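-- pv_equiv track=rewrite | github.com/Neural-Symbolic-Image-Labeling/Rapid | FOIL/model_label/bird_foil_for_vscode_old.py | get_new_total_list
-- ===== SOURCE A (Python) =====
-- import math,re,copy,json,time,random
--
-- def get_new_total_list(result_list,total_list):
--     del_number_hd=[]
--     new_total=copy.deepcopy(total_list)
--     for i in range(len(result_list)):
--         if i!=len(result_list)-1:
--             for image_number,image in enumerate(total_list):
--                 del_result=True
--                 for clause in result_list[i]:
--                     if (clause not in image):        #remember the position of image that does not has special clause
--                         del_result=False
--                         break
--                 if del_result==True:
--                     del_number_hd.append(image_number)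
--         else:
--             for image_number,image in enumerate(total_list):
--                 for clause in result_list[i]:
--                     if (clause not in image):
--                         del_number_hd.append(image_number)
--                         break
--     del_number=list(set(del_number_hd))         #del_number has no duplicate
--     del_number.sort()
--     for i in range(len(del_number)):
--         del new_total[del_number[len(del_number)-1-i]]               #the position is in positive sequence, first delete the back one
--     return new_total   #two dimentional list, get the result which not has the positive that satisfy right side
-- ===== SOURCE B (Python) =====
-- import copy
--
-- def get_new_total_list(result_list, total_list):
--     last = len(result_list) - 1
--
--     def marked(image):
--         delete = False
--         for i, clause_set in enumerate(result_list):
--             if i != last: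
--                 delete = delete or all(c in image for c in clause_set)
--             else:
--                 delete = delete or any(c not in image for c in clause_set)
--         return delete
--
--     return [copy.deepcopy(image) for image in total_list if not marked(image)]
-- ===== Notes on version B (the rewrite author's own statement) =====
-- stated objective: simpler
-- what changed: Replaces the collect-indices / dedupe / sort / delete-from-the-back machinery with a single per-image marking predicate and one filtering comprehension; no index bookkeeping at all.
import Mathlib
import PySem

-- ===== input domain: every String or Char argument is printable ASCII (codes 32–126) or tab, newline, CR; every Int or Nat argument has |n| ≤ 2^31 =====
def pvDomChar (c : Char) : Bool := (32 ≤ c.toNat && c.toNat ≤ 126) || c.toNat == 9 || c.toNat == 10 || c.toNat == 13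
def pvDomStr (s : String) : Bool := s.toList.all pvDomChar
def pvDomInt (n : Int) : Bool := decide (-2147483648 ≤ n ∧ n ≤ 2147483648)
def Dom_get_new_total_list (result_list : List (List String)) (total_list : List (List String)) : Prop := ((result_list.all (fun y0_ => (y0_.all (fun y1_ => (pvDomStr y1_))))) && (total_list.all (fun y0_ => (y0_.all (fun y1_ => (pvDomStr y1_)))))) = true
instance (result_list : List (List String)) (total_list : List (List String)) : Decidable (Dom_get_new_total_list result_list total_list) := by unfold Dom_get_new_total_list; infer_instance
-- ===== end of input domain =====

-- B replaces A's collect-indices / dedupe / sort / delete-from-the-back machinery with one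
-- per-image marking predicate and a single filtering pass (objective: simpler).
-- copy.deepcopy is the identity on Lean's immutable lists; return values are what is compared.

-- ===== PORT A =====
-- inner loop 'for clause in result_list[i]: if clause not in image: del_result = False; break'
def pvAllIn : List String → List String → Bool
  | [], _ => true
  | c :: cs, image => if !image.contains c then false else pvAllIn cs image

-- inner loop of the else branch: append on the FIRST missing clause, then break
def pvAnyMissing : List String → List String → Bool
  | [], _ => false
  | c :: cs, image => if !image.contains c then true else pvAnyMissing cs image

-- the del_number_hd accumulation loop; result_list[i] with i < len is exact as getD,
-- image numbers come from enumerate (Int, as Python ints)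
def pvDelHd (result_list : List (List String)) (total_list : List (List String)) : List Int :=
  (List.range result_list.length).foldl (fun acc i =>
    if i ≠ result_list.length - 1 then
      (PySem.List.enumerate total_list).foldl (fun acc2 p =>
        if pvAllIn (result_list.getD i []) p.2 then acc2 ++ [p.1] else acc2) acc
    else
      (PySem.List.enumerate total_list).foldl (fun acc2 p =>
        if pvAnyMissing (result_list.getD i []) p.2 then acc2 ++ [p.1] else acc2) acc) []

-- del_number = list(set(del_number_hd)); del_number.sort() — sorted with the identity key,
-- so the hash iteration order of the set is irrelevant
def pvDelNum (result_list : List (List String)) (total_list : List (List String)) : List Int :=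
  PySem.List.sorted (PySem.Set.ofList (pvDelHd result_list total_list)) (fun x => x) false

def get_new_total_list (result_list : List (List String)) (total_list : List (List String)) : List (List String) :=
  let del_number := pvDelNum result_list total_list
  -- 'del new_total[k]': k is a nonnegative in-range index by construction (descending distinct
  -- positions < len(total_list)), so eraseIdx with toNat is exact here
  (List.range del_number.length).foldl (fun nt i =>
    nt.eraseIdx ((del_number.getD (del_number.length - 1 - i) 0).toNat)) total_list

-- ===== PORT B =====
def pvMarked (result_list : List (List String)) (image : List String) : Bool :=
  let last : Int := PySem.List.len result_list - 1
  (PySem.List.enumerate result_list).foldl (fun delete p =>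
    if p.1 ≠ last then delete || p.2.all (fun c => image.contains c)
    else delete || p.2.any (fun c => !image.contains c)) false

def get_new_total_list_alt (result_list : List (List String)) (total_list : List (List String)) : List (List String) :=
  total_list.filter (fun image => !pvMarked result_list image)

-- ===== PRECONDITION & SPEC =====
def Spec_get_new_total_list (result_list : List (List String)) (total_list : List (List String)) (out : List (List String)) : Prop := out = get_new_total_list_alt result_list total_list
instance (result_list : List (List String)) (total_list : List (List String)) (out : List (List String)) : Decidable (Spec_get_new_total_list result_list total_list out) := by unfold Spec_get_new_total_list; infer_instance

-- ===== CLAIM (what is proved, stated in full; the proofs are below) =====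
def Claim_equal_get_new_total_list : Prop := ∀ (result_list : List (List String)) (total_list : List (List String)), Dom_get_new_total_list result_list total_list → Spec_get_new_total_list result_list total_list (get_new_total_list result_list total_list)

-- ===== LEMMAS AND PROOFS =====

-- the per-clause-set condition under which A records an image's index / B marks the image
def pvCond (rl : List (List String)) (i : Nat) (img : List String) : Bool :=
  if i ≠ rl.length - 1 then (rl.getD i []).all (fun c => img.contains c)
  else (rl.getD i []).any (fun c => !img.contains c)

lemma pvAllIn_eq (cs img : List String) : pvAllIn cs img = cs.all (fun c => img.contains c) := by
  induction cs with
  | nil => rfl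
  | cons c cs ih => cases h : img.contains c <;> simp [pvAllIn, ih]

lemma pvAnyMissing_eq (cs img : List String) : pvAnyMissing cs img = cs.any (fun c => !img.contains c) := by
  induction cs with
  | nil => rfl
  | cons c cs ih => cases h : img.contains c <;> simp [pvAnyMissing, ih]


lemma pvMarked_iff (rl : List (List String)) (img : List String) :
    pvMarked rl img = true ↔ ∃ i, i < rl.length ∧ pvCond rl i img = true := by
  unfold pvMarked
  have hcongr : ∀ (delete : Bool), ∀ p ∈ PySem.List.enumerate rl,
      (if p.1 ≠ (PySem.List.len rl - 1 : Int) then delete || p.2.all (fun c => img.contains c)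
       else delete || p.2.any (fun c => !img.contains c))
      = (if (if p.1 ≠ (PySem.List.len rl - 1 : Int) then p.2.all (fun c => img.contains c)
             else p.2.any (fun c => !img.contains c)) = true then true else delete) := by
    intro delete p _
    split_ifs <;> simp_all
  rw [PySem.List.foldl_congr_mem _ _ _ _ hcongr, PySem.List.foldl_if_true_eq]
  simp only [Bool.false_or, List.any_eq_true]
  have hbridge : ∀ (k : Nat) (hk : k < rl.length),
      (if ((0 : Int) + (k : Int) ≠ PySem.List.len rl - 1) then (rl[k].all fun c => img.contains c)
       else (rl[k].any fun c => !img.contains c)) = pvCond rl k img := by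
    intro k hk
    simp only [PySem.List.len_eq, pvCond]
    rw [List.getD_eq_getElem rl [] hk]
    by_cases h : k = rl.length - 1
    · rw [if_neg (by omega), if_neg (by omega)]
    · rw [if_pos (by omega), if_pos (by omega)]
  constructor
  · rintro ⟨p, hp, hq⟩
    obtain ⟨k, hk, rfl⟩ := (PySem.List.mem_enumerate_iff rl 0 p).mp hp
    exact ⟨k, hk, by rw [← hbridge k hk]; exact hq⟩
  · rintro ⟨i, hi, hc⟩
    refine ⟨((0 : Int) + (i : Int), rl[i]), (PySem.List.mem_enumerate_iff rl 0 _).mpr ⟨i, hi, rfl⟩, ?_⟩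
    rw [hbridge i hi]; exact hc

lemma mem_pvDelHd (rl tl : List (List String)) (m : Int) :
    m ∈ pvDelHd rl tl ↔ ∃ k, k < tl.length ∧ m = (k : Int) ∧ pvMarked rl (tl.getD k []) = true := by
  unfold pvDelHd
  have hcongr : ∀ (acc : List Int), ∀ i ∈ List.range rl.length,
      (if i ≠ rl.length - 1 then
        (PySem.List.enumerate tl).foldl (fun acc2 p =>
          if pvAllIn (rl.getD i []) p.2 then acc2 ++ [p.1] else acc2) acc
      else
        (PySem.List.enumerate tl).foldl (fun acc2 p =>
          if pvAnyMissing (rl.getD i []) p.2 then acc2 ++ [p.1] else acc2) acc)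
      = acc ++ ((PySem.List.enumerate tl).filter (fun p => pvCond rl i p.2)).map (fun p => p.1) := by
    intro acc i _
    by_cases h : i ≠ rl.length - 1
    · rw [if_pos h, PySem.List.foldl_append_if]
      congr 1
      apply congrArg
      apply List.filter_congr
      intro p _
      rw [pvAllIn_eq, pvCond, if_pos h]
    · rw [if_neg h, PySem.List.foldl_append_if]
      congr 1
      apply congrArg
      apply List.filter_congr
      intro p _
      rw [pvAnyMissing_eq, pvCond, if_neg h]
  rw [PySem.List.foldl_congr_mem _ _ _ _ hcongr, PySem.List.foldl_append_eq_flatMap]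
  simp only [List.nil_append, List.mem_flatMap, List.mem_range, List.mem_map, List.mem_filter]
  constructor
  · rintro ⟨i, hi, p, ⟨hp, hc⟩, rfl⟩
    obtain ⟨k, hk, rfl⟩ := (PySem.List.mem_enumerate_iff tl 0 p).mp hp
    refine ⟨k, hk, by simp, ?_⟩
    rw [pvMarked_iff]
    refine ⟨i, hi, ?_⟩
    rwa [List.getD_eq_getElem tl [] hk]
  · rintro ⟨k, hk, rfl, hmark⟩
    obtain ⟨i, hi, hc⟩ := (pvMarked_iff rl _).mp hmark
    refine ⟨i, hi, ((0 : Int) + (k : Int), tl[k]),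
      ⟨(PySem.List.mem_enumerate_iff tl 0 _).mpr ⟨k, hk, rfl⟩, ?_⟩, by simp⟩
    rwa [List.getD_eq_getElem tl [] hk] at hc

-- keep xs, skipping the positions (counted from n) listed in ds
def pvKeep {α : Type} : List α → Nat → List Nat → List α
  | [], _, _ => []
  | x :: xs, n, ds => if n ∈ ds then pvKeep xs (n+1) ds else x :: pvKeep xs (n+1) ds

lemma pvKeep_nil_ds {α : Type} (xs : List α) (n : Nat) : pvKeep xs n [] = xs := by
  induction xs generalizing n with
  | nil => rfl
  | cons x xs ih => simp [pvKeep, ih]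

lemma pvKeep_drop_lt {α : Type} (xs : List α) (d : Nat) (rest : List Nat) :
    ∀ n, d < n → pvKeep xs n (d :: rest) = pvKeep xs n rest := by
  induction xs with
  | nil => intro n _; rfl
  | cons x xs ih =>
    intro n hn
    have : (n ∈ d :: rest) ↔ n ∈ rest := by simp; omega
    simp only [pvKeep, this]
    rw [ih (n+1) (by omega)]

lemma pvKeep_erase {α : Type} (d : Nat) (rest : List Nat) (hrest : ∀ r ∈ rest, d < r) :
    ∀ (xs : List α) (n : Nat), n ≤ d →
      (pvKeep xs n rest).eraseIdx (d - n) = pvKeep xs n (d :: rest) := by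
  intro xs
  induction xs with
  | nil => intro n _; rfl
  | cons x xs ih =>
    intro n hn
    have hnr : n ∉ rest := fun h => by have := hrest n h; omega
    rcases Nat.eq_or_lt_of_le hn with heq | hlt
    · subst heq
      have hmem : n ∈ n :: rest := by simp
      simp only [pvKeep, if_neg hnr, if_pos hmem, Nat.sub_self, List.eraseIdx_cons_zero]
      rw [pvKeep_drop_lt xs n rest (n+1) (by omega)]
    · have hne : n ∉ (d :: rest) := by simp; constructor <;> [omega; exact hnr]
      simp only [pvKeep, if_neg hnr, if_neg hne]
      have : d - n = (d - (n+1)) + 1 := by omega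
      rw [this, List.eraseIdx_cons_succ]
      rw [ih (n+1) (by omega)]

lemma pvEraseAll_eq_keep {α : Type} (ds : List Nat) (hds : ds.Pairwise (· < ·)) (xs : List α) :
    ds.foldr (fun d nt => nt.eraseIdx d) xs = pvKeep xs 0 ds := by
  induction ds with
  | nil => simp [pvKeep_nil_ds]
  | cons d rest ih =>
    have hpr := (List.pairwise_cons.mp hds)
    simp only [List.foldr_cons]
    rw [ih hpr.2]
    have := pvKeep_erase d rest hpr.1 xs 0 (Nat.zero_le d)
    simpa using this

lemma pvKeep_eq_filter {α : Type} (p : α → Bool) (ds : List Nat) :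
    ∀ (xs : List α) (n : Nat), (∀ k x, xs[k]? = some x → ((n + k ∈ ds) ↔ p x = true)) →
      pvKeep xs n ds = xs.filter (fun x => !p x) := by
  intro xs
  induction xs with
  | nil => intro n _; rfl
  | cons x xs ih =>
    intro n h
    have h0 : (n ∈ ds) ↔ p x = true := by
      have := h 0 x (by simp)
      simpa using this
    have hrec : pvKeep xs (n+1) ds = xs.filter (fun x => !p x) := by
      apply ih
      intro k y hy
      have := h (k+1) y (by simpa using hy)
      have harith : n + (k + 1) = (n + 1) + k := by omega
      rwa [harith] at this
    by_cases hp : p x = true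
    · simp [pvKeep, h0.mpr hp, hrec, hp]
    · have hpx : p x = false := by revert hp; cases p x <;> simp
      have hnm : n ∉ ds := fun hmem => hp (h0.mp hmem)
      simp [pvKeep, hnm, hrec, hpx]

lemma pvFoldDel_eq_foldr (ds : List Int) (xs : List (List String)) :
    (List.range ds.length).foldl (fun nt i =>
        nt.eraseIdx ((ds.getD (ds.length - 1 - i) 0).toNat)) xs
      = (ds.map Int.toNat).foldr (fun d nt => nt.eraseIdx d) xs := by
  have hmap : (List.range ds.length).map (fun i => ds.getD (ds.length - 1 - i) 0) = ds.reverse := by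
    apply List.ext_getElem
    · simp
    · intro i h1 h2
      simp only [List.getElem_map, List.getElem_range, List.getElem_reverse]
      simp only [List.length_map, List.length_range] at h1
      rw [List.getD_eq_getElem ds 0 (by omega)]
  calc (List.range ds.length).foldl (fun nt i =>
          nt.eraseIdx ((ds.getD (ds.length - 1 - i) 0).toNat)) xs
      = ((List.range ds.length).map (fun i => ds.getD (ds.length - 1 - i) 0)).foldl
          (fun nt m => nt.eraseIdx m.toNat) xs := by rw [List.foldl_map]
    _ = ds.reverse.foldl (fun nt m => nt.eraseIdx m.toNat) xs := by rw [hmap]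
    _ = ds.foldr (fun m nt => nt.eraseIdx m.toNat) xs := by rw [List.foldl_reverse]
    _ = (ds.map Int.toNat).foldr (fun d nt => nt.eraseIdx d) xs := by rw [List.foldr_map]

-- ===== VERDICT (by name: the statement is the Claim_ definition above) =====
theorem get_new_total_list_spec : Claim_equal_get_new_total_list := by
  intro rl tl _
  unfold Spec_get_new_total_list get_new_total_list get_new_total_list_alt
  set ds := pvDelNum rl tl with hds
  have hmem : ∀ m, m ∈ ds ↔ ∃ k, k < tl.length ∧ m = (k : Int) ∧ pvMarked rl (tl.getD k []) = true := by
    intro m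
    rw [hds]
    unfold pvDelNum
    rw [PySem.List.mem_sorted, PySem.Set.mem_ofList, mem_pvDelHd]
  have hnonneg : ∀ m ∈ ds, 0 ≤ m := by
    intro m hm
    obtain ⟨k, _, hk, _⟩ := (hmem m).mp hm
    omega
  have hpw : ds.Pairwise (· < ·) := by
    rw [hds]; unfold pvDelNum; exact PySem.List.sorted_ofList_pairwise_lt (xs := pvDelHd rl tl)
  have hpwN : (ds.map Int.toNat).Pairwise (· < ·) := by
    rw [List.pairwise_map]
    apply List.Pairwise.imp_of_mem _ hpw
    intro a b ha hb hab
    have := hnonneg a ha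
    omega
  rw [pvFoldDel_eq_foldr, pvEraseAll_eq_keep _ hpwN]
  apply pvKeep_eq_filter
  intro k x hx
  have hk : k < tl.length := (List.getElem?_eq_some_iff.mp hx).choose
  have hgd : tl.getD k [] = x := by
    rw [List.getD_eq_getElem?_getD, hx]; rfl
  simp only [Nat.zero_add, List.mem_map]
  constructor
  · rintro ⟨m, hm, hmk⟩
    obtain ⟨k', hk', hke, hmark⟩ := (hmem m).mp hm
    have : k' = k := by omega
    subst this
    rwa [hgd] at hmark
  · intro hmark
    refine ⟨(k : Int), (hmem _).mpr ⟨k, hk, rfl, by rwa [hgd]⟩, by simp⟩
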